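-- pv_equiv track=rewrite | github.com/remekozicki/ASD | zadania_offline/zadanie_offline_5/zad5.3.py | greedy_frog_heap
-- ===== SOURCE A (Python) =====
-- from queue import PriorityQueue
--
-- def greedy_frog_heap(T):
--
--     n = len(T)
--
--     S = []
--     S.append(0)
--
--
--     more_inf = [[0 for i  in range(2)]for j in range(n)]
--     for i in range(n):
--         more_inf[i][0] = T[i]
--         more_inf[i][1] = i
--
--     E = T[0]
--     i = 0
--     max_i = 0
--     Q = PriorityQueue()
--
--     while i+E < n-1 and i < n-1:
--         step = 0
--         for j in range(i+1,i+E+1):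
--             tmp = [0,0]
--             tmp[0], tmp[1] = more_inf[j][0]*(-1), more_inf[j][1]
--             Q.put(tmp)
--             step +=1
--
--
--         max_item = Q.get()
--         S.append(max_item[1])
--         i = j
--         E = E - step + max_item[0]*-1
--
--
--     return S
-- ===== SOURCE B (Python) =====
-- def greedy_frog_heap(T):
--     n = len(T)
--     S = [0]
--     i = 0
--     E = T[0]
--     picked = set()
--     while i + E < n - 1 and i < n - 1:
--         i += E
--         j = min((k for k in range(1, i + 1) if k not in picked),
--                 key=lambda k: (-T[k], k))
--         picked.add(j)
--         S.append(j)
--         E = T[j]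
--     return S
-- ===== Notes on version B (the rewrite author's own statement) =====
-- stated objective: simpler
-- what changed: Drops the persistent priority queue entirely: B tracks only the set of already-picked indices and recomputes the best candidate each round with one min() scan over the prefix 1..i, using the fact that the queue's content is always exactly that prefix minus the picked indices, and that E after an update is simply T[j].
-- outside the precondition, e.g. on greedy_frog_heap([2, -5, 1, 9, 0]): A returns [0, 2, 3], B returns [0, 2, 3]; on greedy_frog_heap([1, 0, 5, 7]): A does not finish within the time limit, B raises ValueError; on greedy_frog_heap([]): A raises IndexError, B raises IndexError
import Mathlib
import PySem

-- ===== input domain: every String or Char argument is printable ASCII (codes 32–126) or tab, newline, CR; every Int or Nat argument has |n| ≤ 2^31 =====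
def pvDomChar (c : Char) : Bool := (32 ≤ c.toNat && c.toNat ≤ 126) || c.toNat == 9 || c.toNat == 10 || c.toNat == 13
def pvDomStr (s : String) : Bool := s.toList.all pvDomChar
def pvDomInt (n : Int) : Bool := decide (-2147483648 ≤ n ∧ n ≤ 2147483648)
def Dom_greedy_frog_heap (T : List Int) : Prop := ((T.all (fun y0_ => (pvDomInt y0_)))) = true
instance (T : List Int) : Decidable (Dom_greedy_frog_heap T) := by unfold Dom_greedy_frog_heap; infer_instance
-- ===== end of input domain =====

-- B replaces A's persistent priority queue by a picked-index set plus a min() rescan of the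
-- prefix each round (simpler, no heap); equivalence is about the return value only.

-- ===== PORT A =====
-- The while loop is ported with fuel T.length (inside Pre_ the index i strictly increases each
-- iteration, so the fuel is never exhausted).  PriorityQueue is ported by its observable
-- semantics: put = append, get = lexicographic minimum of the stored pairs (Python compares the
-- two-element lists lexicographically; min2? is Python's tuple-key minimum) removed from the list.
-- The two `=> S` bail-outs correspond to inputs (outside Pre_) where Python raises NameError
-- (unbound j on an empty first window) or blocks forever on Q.get() of an empty queue.
def greedyLoopA (T : List Int) (n : Int) : Nat → List Int → List (Int × Int) → Int → Int → List Int
  | 0, S, _, _, _ => S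
  | fuel + 1, S, Q, i, E =>
    if i + E < n - 1 ∧ i < n - 1 then
      let more_inf := (PySem.List.pyRange 0 n 1).map (fun k => (PySem.List.pyGetD T k 0, k))
      let rng := PySem.List.pyRange (i + 1) (i + E + 1) 1
      match rng.getLast? with
      | none => S
      | some j =>
        let Q' := Q ++ rng.map (fun k =>
          ((PySem.List.pyGetD more_inf k ((0 : Int), (0 : Int))).1 * (-1),
           (PySem.List.pyGetD more_inf k ((0 : Int), (0 : Int))).2))
        let step : Int := rng.length
        match PySem.List.min2? Q' (fun p => p.1) (fun p => p.2) with
        | none => S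
        | some m =>
          greedyLoopA T n fuel (S ++ [m.2]) ((PySem.List.remove? Q' m).getD Q') j
            (E - step + m.1 * (-1))
    else S

def greedy_frog_heap (T : List Int) : List Int :=
  let n : Int := T.length
  greedyLoopA T n T.length [0] [] 0 (PySem.List.pyGetD T 0 0)

-- ===== PORT B =====
def greedyLoopB (T : List Int) (n : Int) : Nat → List Int → PySem.Set Int → Int → Int → List Int
  | 0, S, _, _, _ => S
  | fuel + 1, S, picked, i, E =>
    if i + E < n - 1 ∧ i < n - 1 then
      let i' := i + E
      let cands := (PySem.List.pyRange 1 (i' + 1) 1).filter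
        (fun k => !(PySem.Set.contains picked k))
      match PySem.List.min2? cands (fun k => -(PySem.List.pyGetD T k 0)) (fun k => k) with
      | none => S  -- Python: min() of an empty sequence raises ValueError (outside Pre_)
      | some j =>
        greedyLoopB T n fuel (S ++ [j]) (PySem.Set.add picked j) i' (PySem.List.pyGetD T j 0)
    else S

def greedy_frog_heap_alt (T : List Int) : List Int :=
  let n : Int := T.length
  greedyLoopB T n T.length [0] PySem.Set.empty 0 (PySem.List.pyGetD T 0 0)

-- ===== PRECONDITION & SPEC =====
-- Pre_ excludes lists containing entries ≤ 0 except in the trivially returning shapes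
-- (length 1, or first entry ≥ length-1, where the loop body never runs): with such
-- entries A's loop may raise NameError on an empty first window, block forever on an
-- empty queue, or terminate only path-dependently; it also excludes the empty list,
-- on which A raises IndexError.
def Pre_greedy_frog_heap (T : List Int) : Prop :=
  T ≠ [] ∧ (T.length = 1 ∨ (T.length : Int) - 1 ≤ PySem.List.pyGetD T 0 0 ∨ ∀ x ∈ T, 1 ≤ x)
instance (T : List Int) : Decidable (Pre_greedy_frog_heap T) := by
  unfold Pre_greedy_frog_heap; infer_instance

def pvWitness_greedy_frog_heap : List Int := [2, 3, 1, 1, 4, 1, 1]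

def Spec_greedy_frog_heap (T : List Int) (out : List Int) : Prop := out = greedy_frog_heap_alt T
instance (T : List Int) (out : List Int) : Decidable (Spec_greedy_frog_heap T out) := by
  unfold Spec_greedy_frog_heap; infer_instance

-- ===== CLAIM (what is proved, stated in full; the proofs are below) =====
def Claim_equal_greedy_frog_heap : Prop := ∀ (T : List Int), Dom_greedy_frog_heap T →
  Pre_greedy_frog_heap T → Spec_greedy_frog_heap T (greedy_frog_heap T)

-- ===== LEMMAS AND PROOFS =====

theorem greedy_witness_ok :
    Dom_greedy_frog_heap pvWitness_greedy_frog_heap ∧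
    Pre_greedy_frog_heap pvWitness_greedy_frog_heap := by
  constructor
  · decide
  · unfold Pre_greedy_frog_heap pvWitness_greedy_frog_heap
    exact ⟨by simp, Or.inr (Or.inr (by decide))⟩

-- the queue A holds at each loop head: the not-yet-picked indices of the prefix 1..i,
-- in increasing order, stored as (-T[k], k) pairs
def qOf (T : List Int) (picked : PySem.Set Int) (i : Int) : List (Int × Int) :=
  ((PySem.List.pyRange 1 (i + 1) 1).filter (fun k => !(PySem.Set.contains picked k))).map
    (fun k => (-(PySem.List.pyGetD T k 0), k))

-- the fold step of PySem.List.min2?, named so we can reason about it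
def minStep2 {α : Type} (k1 k2 : α → Int) (acc : Option α) (x : α) : Option α :=
  match acc with
  | none => some x
  | some m =>
    if (decide (k1 x < k1 m) || (!decide (k1 m < k1 x) && decide (k2 x < k2 m))) = true then
      some x else some m

theorem min2?_eq_foldl {α : Type} (k1 k2 : α → Int) (xs : List α) :
    PySem.List.min2? xs k1 k2 = xs.foldl (minStep2 k1 k2) none := rfl

theorem foldl_minStep2_some {α : Type} (k1 k2 : α → Int) (xs : List α) :
    ∀ m : α, ∃ r, xs.foldl (minStep2 k1 k2) (some m) = some r ∧ (r ∈ xs ∨ r = m) := by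
  induction xs with
  | nil => exact fun m => ⟨m, rfl, Or.inr rfl⟩
  | cons x t ih =>
    intro m
    simp only [List.foldl_cons]
    have hx : minStep2 k1 k2 (some m) x = some x ∨ minStep2 k1 k2 (some m) x = some m := by
      simp only [minStep2]
      split
      · exact Or.inl rfl
      · exact Or.inr rfl
    rcases hx with h | h <;> rw [h]
    · obtain ⟨r, hr, hmem⟩ := ih x
      exact ⟨r, hr, by rcases hmem with h' | h' <;> simp [h']⟩
    · obtain ⟨r, hr, hmem⟩ := ih m
      exact ⟨r, hr, by rcases hmem with h' | h' <;> simp [h']⟩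

theorem min2?_mem' {α : Type} (k1 k2 : α → Int) {xs : List α} {m : α}
    (h : PySem.List.min2? xs k1 k2 = some m) : m ∈ xs := by
  cases xs with
  | nil => simp [min2?_eq_foldl] at h
  | cons x t =>
    rw [min2?_eq_foldl] at h
    simp only [List.foldl_cons] at h
    obtain ⟨r, hr, hmem⟩ := foldl_minStep2_some k1 k2 t x
    rw [show minStep2 k1 k2 none x = some x from rfl] at h
    rw [hr] at h
    cases h
    rcases hmem with h' | h' <;> simp [h']

theorem min2?_ne_none {α : Type} (k1 k2 : α → Int) {xs : List α} (h : xs ≠ []) :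
    ∃ m, PySem.List.min2? xs k1 k2 = some m := by
  cases xs with
  | nil => exact absurd rfl h
  | cons x t =>
    rw [min2?_eq_foldl]
    simp only [List.foldl_cons]
    rw [show minStep2 k1 k2 none x = some x from rfl]
    obtain ⟨r, hr, _⟩ := foldl_minStep2_some k1 k2 t x
    exact ⟨r, hr⟩

theorem min2?_map' {α β : Type} (f : α → β) (k1 k2 : β → Int) (xs : List α) :
    PySem.List.min2? (xs.map f) k1 k2 =
      (PySem.List.min2? xs (fun x => k1 (f x)) (fun x => k2 (f x))).map f := by
  rw [min2?_eq_foldl, min2?_eq_foldl, List.foldl_map]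
  suffices h : ∀ acc : Option α,
      List.foldl (fun a x => minStep2 k1 k2 a (f x)) (Option.map f acc) xs =
        Option.map f (xs.foldl (minStep2 (fun x => k1 (f x)) (fun x => k2 (f x))) acc) by
    exact h none
  induction xs with
  | nil => intro acc; rfl
  | cons x t ih =>
    intro acc
    simp only [List.foldl_cons]
    have hstep : minStep2 k1 k2 (Option.map f acc) (f x) =
        Option.map f (minStep2 (fun y => k1 (f y)) (fun y => k2 (f y)) acc x) := by
      cases acc with
      | none => rfl
      | some m =>
        simp only [Option.map_some, minStep2, apply_ite (Option.map f)]
    rw [hstep, ih]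

theorem contains_add (s : PySem.Set Int) (x y : Int) :
    PySem.Set.contains (PySem.Set.add s x) y = (PySem.Set.contains s y || y == x) := by
  by_cases hx : PySem.Set.contains s x
  · rw [PySem.Set.add, if_pos hx]
    by_cases hyx : y = x
    · subst hyx; rw [hx]; simp
    · simp [hyx]
  · rw [PySem.Set.add, if_neg hx]
    by_cases hyx : y = x
    · subst hyx; simp [PySem.Set.contains]
    · simp [PySem.Set.contains, hyx]

theorem loopAB (T : List Int) (hT : ∀ x ∈ T, 1 ≤ x) :
    ∀ (fuel : Nat) (S : List Int) (picked : PySem.Set Int) (i E : Int),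
      0 ≤ i → 1 ≤ E → (∀ k ∈ picked, 1 ≤ k ∧ k ≤ i) →
      greedyLoopA T T.length fuel S (qOf T picked i) i E =
        greedyLoopB T T.length fuel S picked i E := by
  intro fuel
  induction fuel with
  | zero => intro S picked i E _ _ _; rfl
  | succ fuel ih =>
    intro S picked i E hi hE hpk
    by_cases hc : i + E < (T.length : Int) - 1 ∧ i < (T.length : Int) - 1
    case neg => simp only [greedyLoopA, greedyLoopB, if_neg hc]
    case pos =>
    simp only [greedyLoopA, greedyLoopB, if_pos hc]
    obtain ⟨hc1, hc2⟩ := hc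
    have hE0 : 0 ≤ E := by omega
    -- the for loop's last index j is i + E
    have hlast : (PySem.List.pyRange (i + 1) (i + E + 1) 1).getLast? = some (i + E) := by
      rw [PySem.List.pyRange_one_succ_right (by omega : i + 1 ≤ i + E), List.getLast?_concat]
    rw [hlast]
    -- the pushed pairs are (-T[k], k)
    have hmap : (PySem.List.pyRange (i + 1) (i + E + 1) 1).map (fun k =>
          ((PySem.List.pyGetD ((PySem.List.pyRange 0 (T.length : Int) 1).map
              (fun k => (PySem.List.pyGetD T k 0, k))) k ((0 : Int), (0 : Int))).1 * (-1),
           (PySem.List.pyGetD ((PySem.List.pyRange 0 (T.length : Int) 1).map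
              (fun k => (PySem.List.pyGetD T k 0, k))) k ((0 : Int), (0 : Int))).2)) =
        (PySem.List.pyRange (i + 1) (i + E + 1) 1).map
          (fun k => (-(PySem.List.pyGetD T k 0), k)) := by
      apply List.map_congr_left
      intro k hk
      rw [PySem.List.mem_pyRange_one] at hk
      rw [PySem.List.pyGetD_map_pyRange_of_nonneg _ _ _ _ (by omega) (by omega)]
      simp [mul_comm]
    rw [hmap]
    -- after the pushes the queue covers the whole prefix 1..i+E
    have hQ : qOf T picked i ++ (PySem.List.pyRange (i + 1) (i + E + 1) 1).map
          (fun k => (-(PySem.List.pyGetD T k 0), k)) =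
        ((PySem.List.pyRange 1 (i + E + 1) 1).filter
            (fun k => !(PySem.Set.contains picked k))).map
          (fun k => (-(PySem.List.pyGetD T k 0), k)) := by
      unfold qOf
      rw [PySem.List.pyRange_one_append 1 (i + 1) (i + E + 1) (by omega) (by omega),
        List.filter_append, List.map_append]
      congr 2
      symm
      rw [List.filter_eq_self]
      intro k hk
      rw [PySem.List.mem_pyRange_one] at hk
      have hkp : k ∉ picked := fun hm => by have := hpk k hm; omega
      simpa [PySem.Set.contains] using hkp
    rw [hQ]
    set cands : List Int := (PySem.List.pyRange 1 (i + E + 1) 1).filter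
      (fun k => !(PySem.Set.contains picked k)) with hcands
    set f : Int → Int × Int := fun k => (-(PySem.List.pyGetD T k 0), k) with hf
    -- the heap's minimum is the image of B's candidate minimum
    have hie_mem : i + E ∈ cands := by
      rw [hcands]
      refine List.mem_filter.mpr ⟨PySem.List.mem_pyRange_one.mpr ⟨by omega, by omega⟩, ?_⟩
      have hnm : i + E ∉ picked := fun hm => by have := hpk _ hm; omega
      simpa using hnm
    have hcne : cands ≠ [] := fun h => by rw [h] at hie_mem; simp at hie_mem
    obtain ⟨j, hj⟩ :=
      min2?_ne_none (fun k => -(PySem.List.pyGetD T k 0)) (fun k => k) hcne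
    have hjmem : j ∈ cands :=
      min2?_mem' (fun k => -(PySem.List.pyGetD T k 0)) (fun k => k) hj
    have hjrange : 1 ≤ j ∧ j < i + E + 1 := by
      rw [hcands] at hjmem
      exact PySem.List.mem_pyRange_one.mp (List.mem_filter.mp hjmem).1
    have hjnp : j ∉ picked := by
      intro hm
      have h2 := (List.mem_filter.mp hjmem).2
      simp [PySem.Set.contains] at h2
      exact h2 hm
    have hminA : PySem.List.min2? (cands.map f) (fun p => p.1) (fun p => p.2) =
        some (f j) := by
      rw [min2?_map']
      have : (fun x => (f x).1) = fun k => -(PySem.List.pyGetD T k 0) := by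
        funext k; rw [hf]
      rw [this]
      have : (fun x => (f x).2) = fun k : Int => k := by funext k; rw [hf]
      rw [this, hj, Option.map_some]
    rw [hminA, hj]
    -- the length of the pushed window is E (used below)
    have hlen : ((PySem.List.pyRange (i + 1) (i + E + 1) 1).length : Int) = E := by
      rw [PySem.List.length_pyRange_one,
        show i + E + 1 - (i + 1) = E by ring, Int.toNat_of_nonneg hE0]
    -- removing the extracted pair keeps the queue in prefix form
    have hfinj : Function.Injective f := by
      intro a b h
      have := congrArg Prod.snd h
      simpa [hf] using this
    have hrem : (PySem.List.remove? (cands.map f) (f j)).getD (cands.map f) =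
        qOf T (PySem.Set.add picked j) (i + E) := by
      rw [PySem.List.remove?_eq_some_erase _ _ (List.mem_map_of_mem hjmem),
        Option.getD_some, ← List.map_erase hfinj]
      have hnd : cands.Nodup := (PySem.List.nodup_pyRange_one 1 (i + E + 1)).filter _
      rw [hnd.erase_eq_filter j]
      unfold qOf
      rw [hcands, List.filter_filter]
      congr 1
      apply List.filter_congr
      intro k _
      rw [contains_add]
      cases hpc : PySem.Set.contains picked k <;> by_cases hkj : k = j <;>
        simp_all [bne]

    -- the chosen index is a valid position with T[j] ≥ 1
    have hTj : 1 ≤ PySem.List.pyGetD T j 0 := by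
      rw [PySem.List.pyGetD_eq_getElem T 0 (by omega) (by omega)]
      exact hT _ (List.getElem_mem _)
    have hpk' : ∀ k ∈ PySem.Set.add picked j, 1 ≤ k ∧ k ≤ i + E := by
      intro k hk
      rw [PySem.Set.mem_add] at hk
      rcases hk with hk | hk
      · have := hpk k hk; omega
      · subst hk; omega
    -- the two reduced recursive calls agree by the induction hypothesis
    have main : greedyLoopA T (T.length : Int) fuel (S ++ [(f j).2])
        ((PySem.List.remove? (cands.map f) (f j)).getD (cands.map f)) (i + E)
        (E - ((PySem.List.pyRange (i + 1) (i + E + 1) 1).length : Int) + (f j).1 * (-1)) =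
        greedyLoopB T (T.length : Int) fuel (S ++ [j]) (PySem.Set.add picked j) (i + E)
          (PySem.List.pyGetD T j 0) := by
      have harith : E - ((PySem.List.pyRange (i + 1) (i + E + 1) 1).length : Int) +
          (f j).1 * (-1) = PySem.List.pyGetD T j 0 := by
        rw [hlen, hf]; ring
      have hsnd : (f j).2 = j := by rw [hf]
      rw [hrem, harith, hsnd]
      exact ih (S ++ [j]) (PySem.Set.add picked j) (i + E) (PySem.List.pyGetD T j 0)
        (by omega) hTj hpk'
    exact main

theorem pyGetD_head (a : Int) (T' : List Int) :
    PySem.List.pyGetD (a :: T') 0 0 = a := by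
  rw [PySem.List.pyGetD_eq_getElem (a :: T') 0 (by omega) (by simp)]
  rfl

-- ===== VERDICT (by name: the statement is the Claim_ definition above) =====
theorem greedy_frog_heap_spec : Claim_equal_greedy_frog_heap := by
  intro T _ hpre
  unfold Spec_greedy_frog_heap
  obtain ⟨hne, hcase⟩ := hpre
  obtain ⟨a, T', rfl⟩ : ∃ a T', T = a :: T' := by
    cases T with
    | nil => exact absurd rfl hne
    | cons a T' => exact ⟨a, T', rfl⟩
  rcases hcase with h1 | h2 | h3
  · -- singleton list: the loop condition 0 < n-1 fails at once
    have hT' : T' = [] := by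
      simp only [List.length_cons] at h1
      exact List.eq_nil_of_length_eq_zero (by omega)
    subst hT'
    simp [greedy_frog_heap, greedy_frog_heap_alt, greedyLoopA, greedyLoopB]
  · -- first entry ≥ n-1: the loop condition i+E < n-1 fails at once
    rw [pyGetD_head] at h2
    simp only [List.length_cons] at h2
    have hnc : ¬((0 : Int) + PySem.List.pyGetD (a :: T') 0 0 <
        (((T'.length + 1 : Nat)) : Int) - 1 ∧
        (0 : Int) < (((T'.length + 1 : Nat)) : Int) - 1) := by
      rintro ⟨hlt, -⟩
      rw [pyGetD_head] at hlt
      omega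
    simp only [greedy_frog_heap, greedy_frog_heap_alt, List.length_cons, greedyLoopA,
      greedyLoopB]
    rw [if_neg hnc, if_neg hnc]
  · -- all entries ≥ 1: the main loop invariant argument
    have hq0 : qOf (a :: T') PySem.Set.empty 0 = [] := by
      simp [qOf, PySem.List.pyRange_one_eq_nil (by omega : (1 : Int) ≤ 1)]
    have hE1 : 1 ≤ PySem.List.pyGetD (a :: T') 0 0 := by
      rw [pyGetD_head]; exact h3 a List.mem_cons_self
    have := loopAB (a :: T') h3 (a :: T').length [0] PySem.Set.empty 0
      (PySem.List.pyGetD (a :: T') 0 0) le_rfl hE1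
      (by intro k hk; simp [PySem.Set.empty] at hk)
    rw [hq0] at this
    simpa [greedy_frog_heap, greedy_frog_heap_alt] using this
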